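-- pv_equiv track=rewrite | github.com/TomaszGolan/hdf5_manipulator | make_spec_combined_hdf5.py | slices_maker
-- ===== SOURCE A (Python) =====
-- def slices_maker(n, slice_size=100000):
--     """
--     make "slices" of size `slice_size` from a file of `n` events
--     (so, [0, slice_size), [slice_size, 2 * slice_size), etc.)
--     """
--     if n < slice_size:
--         return [(0, n)]
--
--     remainder = n % slice_size
--     n = n - remainder
--     nblocks = n // slice_size
--     counter = 0
--     slices = []
--     for i in range(nblocks):
--         end = counter + slice_size
--         slices.append((counter, end))
--         counter += slice_size
--
--     if remainder != 0:
--         slices.append((counter, counter + remainder))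
--
--     return slices
-- ===== SOURCE B (Python) =====
-- def slices_maker(n, slice_size=100000):
--     """
--     make "slices" of size `slice_size` from a file of `n` events
--     (so, [0, slice_size), [slice_size, 2 * slice_size), etc.)
--     """
--     if n < slice_size:
--         return [(0, n)]
--     # build the slices back-to-front: the last slice ends at n and starts at the
--     # largest multiple of slice_size below n; every earlier slice is full-sized
--     slices = []
--     end = n
--     while end > 0:
--         start = (end - 1) // slice_size * slice_size
--         slices.append((start, end))
--         end = start
--     slices.reverse()
--     return slices
-- ===== Notes on version B (the rewrite author's own statement) =====
-- stated objective: alternative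
-- what changed: B builds the slice list back-to-front: a while loop walks end from n down to 0, computing each slice's start as the largest multiple of slice_size below end via (end-1)//slice_size*slice_size, then reverses, instead of A's forward counter loop over nblocks plus a separate remainder append.
-- outside the precondition, e.g. on slices_maker(6, -3): A returns [], B does not finish within the time limit; on slices_maker(-3, -3): A returns [(0, -3)], B returns []
import Mathlib
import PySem

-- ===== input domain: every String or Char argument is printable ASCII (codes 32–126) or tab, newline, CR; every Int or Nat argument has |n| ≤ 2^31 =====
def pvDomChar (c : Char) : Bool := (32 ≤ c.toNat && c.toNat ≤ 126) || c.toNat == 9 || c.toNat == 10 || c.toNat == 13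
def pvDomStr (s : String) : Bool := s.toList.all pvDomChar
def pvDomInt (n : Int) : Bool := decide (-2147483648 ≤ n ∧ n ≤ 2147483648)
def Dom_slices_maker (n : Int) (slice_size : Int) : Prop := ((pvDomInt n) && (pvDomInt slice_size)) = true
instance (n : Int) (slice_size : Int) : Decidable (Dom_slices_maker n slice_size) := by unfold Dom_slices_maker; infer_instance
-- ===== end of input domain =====

-- B builds the slice list back-to-front: the last slice ends at n and starts at the
-- largest multiple of slice_size below n, earlier slices are full; then reverses
-- (objective: alternative decomposition, same cost).

-- ===== PORT A =====
def slices_maker (n : Int) (slice_size : Int) : List (Int × Int) :=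
  if n < slice_size then [(0, n)]
  else
    let remainder := PySem.Int.mod n slice_size
    let n' := n - remainder
    let nblocks := PySem.Int.floordiv n' slice_size
    let st := (PySem.List.pyRange 0 nblocks 1).foldl
      (fun (st : Int × List (Int × Int)) _ =>
        let e := st.1 + slice_size
        (st.1 + slice_size, st.2 ++ [(st.1, e)]))
      (0, [])
    if remainder ≠ 0 then st.2 ++ [(st.1, st.1 + remainder)] else st.2

-- ===== PORT B =====
-- B's while loop, with a fuel bound that merely makes it total (the loop runs at
-- most n iterations when 0 < slice_size, the only looping case inside Pre_).
def altLoop (fuel : Nat) (slice_size : Int) (e : Int) (acc : List (Int × Int)) :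
    List (Int × Int) :=
  match fuel with
  | 0 => acc
  | f + 1 =>
    if 0 < e then
      let start := PySem.Int.floordiv (e - 1) slice_size * slice_size
      altLoop f slice_size start (acc ++ [(start, e)])
    else acc

def slices_maker_alt (n : Int) (slice_size : Int) : List (Int × Int) :=
  if n < slice_size then [(0, n)]
  else (altLoop (n.toNat + 1) slice_size n []).reverse

-- ===== PRECONDITION & SPEC =====
-- Pre_ excludes slice_size ≤ 0 with slice_size ≤ n: there A raises ZeroDivisionError
-- (slice_size = 0, n ≥ 0) or returns implementation-artefact partial/empty slice lists
-- for a negative slice size (e.g. [] or [(0, -1)]), a corner no caller would specify,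
-- while B's backwards loop does not terminate (or, at n = slice_size < 0, returns []).
def Pre_slices_maker (n : Int) (slice_size : Int) : Prop :=
  n < slice_size ∨ 0 < slice_size
instance (n : Int) (slice_size : Int) : Decidable (Pre_slices_maker n slice_size) := by
  unfold Pre_slices_maker; infer_instance

def pvWitness_slices_maker : Int × Int := (7, 3)

def Spec_slices_maker (n : Int) (slice_size : Int) (out : List (Int × Int)) : Prop := out = slices_maker_alt n slice_size
instance (n : Int) (slice_size : Int) (out : List (Int × Int)) : Decidable (Spec_slices_maker n slice_size out) := by unfold Spec_slices_maker; infer_instance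

-- ===== CLAIM (what is proved, stated in full; the proofs are below) =====
def Claim_equal_slices_maker : Prop := ∀ (n : Int) (slice_size : Int), Dom_slices_maker n slice_size → Pre_slices_maker n slice_size → Spec_slices_maker n slice_size (slices_maker n slice_size)

-- ===== LEMMAS AND PROOFS =====

-- the common closed form both programs compute for 0 < slice_size ≤ n:
-- q full blocks, then the remainder block ending at n (if any)
def Lform (n ss : Int) : List (Int × Int) :=
  (List.range (n / ss).toNat).map (fun (k : Nat) => (((k : Int) * ss, ((k : Int) + 1) * ss) : Int × Int))
    ++ (if n % ss ≠ 0 then [((n / ss) * ss, n)] else [])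

lemma Lform_zero (ss : Int) : Lform 0 ss = [] := by
  simp [Lform]

-- peeling the last block off the closed form
lemma Lform_step (ss e : Int) (hss : 0 < ss) (he : 0 < e) :
    Lform e ss = Lform ((e - 1) / ss * ss) ss ++ [((e - 1) / ss * ss, e)] := by
  have hssne : ss ≠ 0 := ne_of_gt hss
  have hqr : ss * (e / ss) + e % ss = e := Int.mul_ediv_add_emod e ss
  have hr0 : 0 ≤ e % ss := Int.emod_nonneg e hssne
  have hrlt : e % ss < ss := Int.emod_lt_of_pos e hss
  by_cases h0 : e % ss = 0
  · -- e is a multiple of ss: the peeled block is a full one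
    have hq1 : 1 ≤ e / ss := by nlinarith
    have hdiv : (e - 1) / ss = e / ss - 1 := by
      have hsub : e - 1 = (ss - 1) + (e / ss - 1) * ss := by nlinarith
      rw [hsub, Int.add_mul_ediv_right _ _ hssne,
        Int.ediv_eq_zero_of_lt (by omega) (by omega)]
      ring
    rw [hdiv]
    unfold Lform
    rw [Int.mul_ediv_cancel _ hssne, Int.mul_emod_left, h0]
    rw [if_neg (by simp), if_neg (by simp), List.append_nil, List.append_nil]
    have ht : (e / ss).toNat = (e / ss - 1).toNat + 1 := by omega
    rw [ht, List.range_succ, List.map_append, List.map_cons, List.map_nil]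
    congr 2
    have hm : (((e / ss - 1).toNat : Int)) = e / ss - 1 := by omega
    rw [hm, Prod.mk.injEq]
    exact ⟨rfl, by nlinarith⟩
  · -- remainder block (e/ss * ss, e)
    have hdiv : (e - 1) / ss = e / ss := by
      have hsub : e - 1 = (e % ss - 1) + (e / ss) * ss := by nlinarith
      rw [hsub, Int.add_mul_ediv_right _ _ hssne,
        Int.ediv_eq_zero_of_lt (by omega) (by omega)]
      ring
    rw [hdiv]
    unfold Lform
    rw [Int.mul_ediv_cancel _ hssne, Int.mul_emod_left]
    rw [if_pos h0, if_neg (by simp), List.append_nil]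

-- B's loop computes the reversed closed form
lemma altLoop_eq (ss : Int) (hss : 0 < ss) : ∀ (fuel : Nat) (e : Int)
    (acc : List (Int × Int)), 0 ≤ e → e.toNat ≤ fuel →
    altLoop fuel ss e acc = acc ++ (Lform e ss).reverse := by
  intro fuel
  induction fuel with
  | zero =>
      intro e acc h0 hf
      have : e = 0 := by omega
      subst this
      simp [altLoop, Lform_zero]
  | succ f ih =>
      intro e acc h0 hf
      by_cases hpos : 0 < e
      · have hfd : PySem.Int.floordiv (e - 1) ss = (e - 1) / ss :=
          PySem.Int.floordiv_eq_ediv_of_pos hss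
        have hs0 : 0 ≤ (e - 1) / ss * ss :=
          mul_nonneg (Int.ediv_nonneg (by omega) (by omega)) (by omega)
        have hsle : (e - 1) / ss * ss ≤ e - 1 := Int.ediv_mul_le _ (ne_of_gt hss)
        simp only [altLoop, hpos, if_true, hfd]
        rw [ih _ _ hs0 (by omega), Lform_step ss e hss hpos]
        simp
      · have : e = 0 := by omega
        subst this
        simp [altLoop, Lform_zero]

-- A's loop, characterised: starting from counter c, m iterations append the m
-- consecutive blocks and advance the counter by m * slice_size.
lemma slicesA_loop (ss : Int) (m : Nat) : ∀ (c : Int) (acc : List (Int × Int)),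
    (List.range m).foldl (fun (st : Int × List (Int × Int)) _ =>
        (st.1 + ss, st.2 ++ [(st.1, st.1 + ss)])) (c, acc)
    = (c + m * ss, acc ++ (List.range m).map
        (fun (k : Nat) => ((c + (k : Int) * ss, c + ((k : Int) + 1) * ss) : Int × Int))) := by
  induction m with
  | zero => intro c acc; simp
  | succ m ih =>
      intro c acc
      rw [List.range_succ, List.foldl_append, List.map_append, ih]
      have h2 : ∀ k : Int, c + k * ss + ss = c + (k + 1) * ss := by intro k; ring
      simp only [List.foldl_cons, List.foldl_nil, List.append_assoc, List.map_cons,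
        List.map_nil, Prod.mk.injEq, h2]
      exact ⟨by push_cast; ring, trivial⟩

-- A computes the closed form when slice_size ≤ n and 0 < slice_size
lemma slicesA_eq (n ss : Int) (hss : 0 < ss) (hn : ¬ n < ss) :
    slices_maker n ss = Lform n ss := by
  have hssne : ss ≠ 0 := ne_of_gt hss
  have hn0 : 0 < n := lt_of_lt_of_le hss (le_of_not_gt hn)
  have hqr : ss * (n / ss) + n % ss = n := Int.mul_ediv_add_emod n ss
  have hr0 : 0 ≤ n % ss := Int.emod_nonneg n hssne
  have hrlt : n % ss < ss := Int.emod_lt_of_pos n hss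
  have hq0 : 0 ≤ n / ss := Int.ediv_nonneg (by omega) (by omega)
  have hqcast : (((n / ss).toNat : Int)) = n / ss := Int.toNat_of_nonneg hq0
  have hrem : PySem.Int.mod n ss = n % ss := PySem.Int.mod_eq_emod_of_pos hss
  have hnb : PySem.Int.floordiv (n - n % ss) ss = n / ss := by
    rw [PySem.Int.floordiv_eq_ediv_of_pos hss]
    have h1 : n - n % ss = ss * (n / ss) := by linarith
    rw [h1, Int.mul_ediv_cancel_left _ hssne]
  unfold slices_maker
  simp only [hn, if_false, hrem, hnb]
  have hrange : PySem.List.pyRange 0 (n / ss) 1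
      = (List.range ((n / ss).toNat)).map (fun (k : Nat) => ((0 : Int) + (k : Int))) := by
    rw [PySem.List.pyRange_one]
    norm_num
  have hA : (PySem.List.pyRange 0 (n / ss) 1).foldl
      (fun (st : Int × List (Int × Int)) _ =>
        (st.1 + ss, st.2 ++ [(st.1, st.1 + ss)])) ((0 : Int), ([] : List (Int × Int)))
      = (n / ss * ss, (List.range (n / ss).toNat).map
          (fun (k : Nat) => (((k : Int) * ss, ((k : Int) + 1) * ss) : Int × Int))) := by
    rw [hrange]
    simp only [List.foldl_map]
    rw [slicesA_loop]
    simp [hqcast]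
  rw [hA]
  unfold Lform
  by_cases h0 : n % ss = 0
  · rw [if_neg (not_not_intro h0), if_neg (not_not_intro h0), List.append_nil]
  · rw [if_pos h0, if_pos h0]
    have hend : n / ss * ss + n % ss = n := by nlinarith
    rw [hend]

-- ===== VERDICT (by name: the statement is the Claim_ definition above) =====
theorem slices_maker_spec : Claim_equal_slices_maker := by
  intro n ss _ hpre
  unfold Spec_slices_maker
  by_cases hlt : n < ss
  · unfold slices_maker slices_maker_alt
    simp [hlt]
  · have hss : 0 < ss := by
      rcases hpre with h | h
      · exact absurd h hlt
      · exact h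
    have hn0 : 0 ≤ n := le_trans (le_of_lt hss) (le_of_not_gt hlt)
    rw [slicesA_eq n ss hss hlt]
    unfold slices_maker_alt
    simp only [hlt, if_false]
    rw [altLoop_eq ss hss (n.toNat + 1) n [] hn0 (by omega)]
    simp
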